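-- pv_equiv track=rewrite | github.com/skfo763/Problem_Solving | psroadmap/bruteforce/15655.py | f
-- ===== SOURCE A (Python) =====
-- import copy
--
-- def f(input_list, k):
--     if k == 1:
--         return list(map(lambda x: [x], input_list))
--     else:
--         prev_list = f(input_list, k-1)
--         res = []
--         for num in prev_list:
--             for i in input_list:
--                 if num[-1] >= i:
--                     continue
--                 else:
--                     temp_num = copy.deepcopy(num)
--                     temp_num.append(i)
--                     res.append(temp_num)
--         return res
-- ===== SOURCE B (Python) =====
-- def f(input_list, k):
--     res = []
--     def dfs(path, last):
--         if len(path) == k: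
--             res.append(path[:])
--             return
--         for x in input_list:
--             if last is None or x > last:
--                 path.append(x)
--                 dfs(path, x)
--                 path.pop()
--     dfs([], None)
--     return res
-- ===== Notes on version B (the rewrite author's own statement) =====
-- stated objective: alternative
-- what changed: Replaced A's layer-by-layer breadth-first construction (recursing on k, materializing every length-(k-1) layer and deep-copying each partial list to extend it) with a depth-first backtracking generator that maintains a single mutable path and records a copy only when it reaches length k.
import Mathlib
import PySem

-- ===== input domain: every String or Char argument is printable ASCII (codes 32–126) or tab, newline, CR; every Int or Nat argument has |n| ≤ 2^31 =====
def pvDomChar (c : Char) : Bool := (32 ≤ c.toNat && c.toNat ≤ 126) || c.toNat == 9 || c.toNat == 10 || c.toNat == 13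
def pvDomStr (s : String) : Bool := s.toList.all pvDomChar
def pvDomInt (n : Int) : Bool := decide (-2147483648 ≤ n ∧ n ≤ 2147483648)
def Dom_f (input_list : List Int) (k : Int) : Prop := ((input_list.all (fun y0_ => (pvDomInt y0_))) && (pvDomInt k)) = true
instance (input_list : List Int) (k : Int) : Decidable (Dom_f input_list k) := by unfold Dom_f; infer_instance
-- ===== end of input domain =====

-- B replaces A's layer-by-layer construction (materialising every length-(k-1) layer and
-- deep-copying each partial list) with a depth-first backtracking generator holding one partial
-- path; same return value on k ≥ 1 (A recurses forever for k ≤ 0, excluded by Pre_f).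

-- ===== PORT A =====
-- one pass of A's double for-loop over the previous layer
def fA_step (input_list : List Int) (prev : List (List Int)) : List (List Int) :=
  prev.foldl (fun res num =>
    input_list.foldl (fun res2 i =>
      -- num[-1]: every num in a layer is nonempty, so the .getD 0 default is never used
      if (PySem.List.pyGet? num (-1)).getD 0 ≥ i then res2
      else res2 ++ [num ++ [i]]) res) []

-- A's recursion on k, on the Nat view of k (k ≤ 0, where Python A never returns, gives [])
def fA (input_list : List Int) : Nat → List (List Int)
  | 0 => []                               -- unreachable under Pre_f (guard making the port total)
  | 1 => input_list.map (fun x => [x])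
  | n + 2 => fA_step input_list (fA input_list (n + 1))

def f (input_list : List Int) (k : Int) : List (List Int) := fA input_list k.toNat

-- ===== PORT B =====
-- 'last is None or x > last'
def okB (last : Option Int) (x : Int) : Bool :=
  match last with
  | none => true
  | some l => decide (l < x)

-- B's dfs; the Nat argument is the number of elements still needed (k - len(path))
def dfsB (input_list : List Int) (path : List Int) (last : Option Int) : Nat → List (List Int)
  | 0 => [path]
  | n + 1 =>
    input_list.foldl (fun acc x =>
      if okB last x then acc ++ dfsB input_list (path ++ [x]) (some x) n else acc) []

-- for k < 0 Python B's dfs exhausts its finite strictly increasing chains and records nothing;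
-- the guard returns that [] directly (a totality guard: .toNat would clamp k < 0 to 0)
def f_alt (input_list : List Int) (k : Int) : List (List Int) :=
  if k < 0 then [] else dfsB input_list [] none k.toNat

-- ===== PRECONDITION & SPEC =====
-- Pre_f excludes k ≤ 0, on which Python A recurses without a base case and raises RecursionError.
def Pre_f (input_list : List Int) (k : Int) : Prop := 1 ≤ k
instance (input_list : List Int) (k : Int) : Decidable (Pre_f input_list k) := by
  unfold Pre_f; infer_instance

def pvWitness_f : List Int × Int := ([1, 2, 3], 2)

def Spec_f (input_list : List Int) (k : Int) (out : List (List Int)) : Prop :=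
  out = f_alt input_list k
instance (input_list : List Int) (k : Int) (out : List (List Int)) : Decidable (Spec_f input_list k out) := by
  unfold Spec_f; infer_instance

-- ===== CLAIM (what is proved, stated in full; the proofs are below) =====
def Claim_equal_f : Prop := ∀ (input_list : List Int) (k : Int), Dom_f input_list k → Pre_f input_list k → Spec_f input_list k (f input_list k)

-- ===== LEMMAS AND PROOFS =====

-- The family of strictly increasing suffix lists B's dfs enumerates:
-- S L last n = all length-n sequences drawn from L, each strictly increasing and with first
-- element accepted by okB last, in dfs order.
def S (L : List Int) (last : Option Int) : Nat → List (List Int)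
  | 0 => [[]]
  | n + 1 => L.flatMap (fun x => if okB last x then (S L (some x) n).map (fun t => x :: t) else [])

-- generic: 'if c then acc else acc ++ [y]' loops are flatMaps
lemma foldl_skip_append {α β : Type} (L : List α) (c : α → Prop) [DecidablePred c] (g : α → List β) :
    ∀ acc : List β,
      L.foldl (fun acc2 x => if c x then acc2 else acc2 ++ g x) acc
        = acc ++ L.flatMap (fun x => if c x then [] else g x) := by
  induction L with
  | nil => intro acc; simp
  | cons a t ih =>
    intro acc
    by_cases h : c a <;> simp [h, ih, List.append_assoc]

lemma foldl_keep_append {α β : Type} (L : List α) (c : α → Bool) (g : α → List β) :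
    ∀ acc : List β,
      L.foldl (fun acc2 x => if c x then acc2 ++ g x else acc2) acc
        = acc ++ L.flatMap (fun x => if c x then g x else []) := by
  induction L with
  | nil => intro acc; simp
  | cons a t ih =>
    intro acc
    by_cases h : c a = true <;> simp [h, ih, List.append_assoc]

-- B's dfs produces path ++ each suffix from S
lemma dfsB_eq_S (L : List Int) :
    ∀ (n : Nat) (path : List Int) (last : Option Int),
      dfsB L path last n = (S L last n).map (fun t => path ++ t) := by
  intro n
  induction n with
  | zero => intro path last; simp [dfsB, S]
  | succ n ih =>
    intro path last
    rw [dfsB, foldl_keep_append]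
    simp only [S, List.map_flatMap]
    refine List.flatMap_congr (fun x _ => ?_)
    by_cases h : okB last x = true <;>
      simp [h, ih, List.map_map, Function.comp_def, List.append_assoc]

-- A's step as a flatMap
lemma fA_step_flatMap (L : List Int) (prev : List (List Int)) :
    fA_step L prev
      = prev.flatMap (fun num =>
          L.flatMap (fun i =>
            if (PySem.List.pyGet? num (-1)).getD 0 ≥ i then [] else [num ++ [i]])) := by
  unfold fA_step
  have h : ∀ acc,
      prev.foldl (fun res num =>
        L.foldl (fun res2 i =>
          if (PySem.List.pyGet? num (-1)).getD 0 ≥ i then res2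
          else res2 ++ [num ++ [i]]) res) acc
      = acc ++ prev.flatMap (fun num =>
          L.flatMap (fun i =>
            if (PySem.List.pyGet? num (-1)).getD 0 ≥ i then [] else [num ++ [i]])) := by
    induction prev with
    | nil => intro acc; simp
    | cons a t ih =>
      intro acc
      rw [List.foldl_cons, ih,
        foldl_skip_append L (fun i => (PySem.List.pyGet? a (-1)).getD 0 ≥ i)
          (fun i => [a ++ [i]]) acc]
      simp [List.append_assoc]
  simpa using h []

-- effective "last" value of a partial sequence
def lastOpt (num : List Int) (last : Option Int) : Option Int :=
  match num.getLast? with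
  | some l => some l
  | none => last

lemma lastOpt_cons (x : Int) (num : List Int) (last : Option Int) :
    lastOpt (x :: num) last = lastOpt num (some x) := by
  cases num with
  | nil => simp [lastOpt]
  | cons b t =>
    simp only [lastOpt, List.getLast?_cons_cons]
    cases hx : (b :: t).getLast? with
    | none => simp at hx
    | some l => rfl

-- key: front-extension recursion S also satisfies A's end-extension recurrence
lemma S_succ_end (L : List Int) :
    ∀ (n : Nat) (last : Option Int),
      S L last (n + 1)
        = (S L last n).flatMap (fun num =>
            L.flatMap (fun i =>
              if okB (lastOpt num last) i then [num ++ [i]] else [])) := by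
  intro n
  induction n with
  | zero =>
    intro last
    simp only [S, List.flatMap_cons, List.flatMap_nil, List.append_nil]
    refine List.flatMap_congr (fun x _ => ?_)
    by_cases h : okB last x = true <;> simp [h, lastOpt]
  | succ n ih =>
    intro last
    conv_lhs => rw [S]
    conv_rhs => rw [S]
    rw [List.flatMap_assoc]
    refine List.flatMap_congr (fun x _ => ?_)
    by_cases h : okB last x = true
    · rw [if_pos h, if_pos h, ih (some x), List.map_flatMap, List.flatMap_map]
      refine List.flatMap_congr (fun num _ => ?_)
      rw [← lastOpt_cons x num last, List.map_flatMap]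
      refine List.flatMap_congr (fun i _ => ?_)
      by_cases h3 : okB (lastOpt (x :: num) last) i = true <;> simp [h3]
    · simp [h]

-- members of a nonzero-length layer are nonempty
lemma S_mem_ne_nil (L : List Int) (n : Nat) (last : Option Int) :
    ∀ num ∈ S L last (n + 1), num ≠ [] := by
  intro num hnum
  simp only [S, List.mem_flatMap] at hnum
  obtain ⟨x, _, hx⟩ := hnum
  by_cases h : okB last x = true
  · rw [if_pos h, List.mem_map] at hx
    obtain ⟨t, _, ht⟩ := hx
    simp [← ht]
  · simp [h] at hx

-- on nonempty num, A's skip-test agrees with okB of the effective last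
lemma cond_eq (num : List Int) (last : Option Int) (i : Int) (h : num ≠ []) :
    (if (PySem.List.pyGet? num (-1)).getD 0 ≥ i then ([] : List (List Int)) else [num ++ [i]])
      = (if okB (lastOpt num last) i then [num ++ [i]] else []) := by
  obtain ⟨l, hl⟩ : ∃ l, num.getLast? = some l := by
    cases hx : num.getLast? with
    | none => exact absurd (List.getLast?_eq_none_iff.mp hx) h
    | some l => exact ⟨l, rfl⟩
  rw [PySem.List.pyGet?_neg_one, hl]
  simp only [lastOpt, hl, Option.getD_some, okB]
  by_cases hc : l < i
  · rw [if_neg (by omega), if_pos (by simpa using hc)]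
  · rw [if_pos (by omega), if_neg (by simpa using hc)]

-- A's layers are exactly S from an empty constraint
lemma fA_eq_S (L : List Int) : ∀ n : Nat, fA L (n + 1) = S L none (n + 1) := by
  intro n
  induction n with
  | zero =>
    simp only [fA, S, okB, if_pos]
    induction L with
    | nil => rfl
    | cons a t ihL => simp_all
  | succ n ih =>
    have : fA L (n + 1 + 1) = fA_step L (fA L (n + 1)) := rfl
    rw [this, ih, fA_step_flatMap]
    conv_rhs => rw [S_succ_end]
    refine List.flatMap_congr (fun num hnum => ?_)
    refine List.flatMap_congr (fun i _ => ?_)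
    exact cond_eq num none i (S_mem_ne_nil L n none num hnum)

-- ===== VERDICT (by name: the statement is the Claim_ definition above) =====
theorem f_spec : Claim_equal_f := by
  intro L k _ hk
  unfold Pre_f at hk
  unfold Spec_f f f_alt
  obtain ⟨n, hn⟩ : ∃ n : Nat, k.toNat = n + 1 := ⟨k.toNat - 1, by omega⟩
  rw [if_neg (by omega), hn, dfsB_eq_S, fA_eq_S]
  simp
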